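-- pv_equiv track=rewrite | github.com/sean9892/my-ctf-challenges | GoNQual/GoNQual24Fall/king-of-yacht/solution/solver.py | dlog
-- ===== SOURCE A (Python) =====
-- def dlog(base,tar):
--     MOD = 2**512
--     o = 512
--     while True:
--         if pow(base,2**o,MOD) == 1:
--             o -= 1
--         else:
--             o += 1
--             break
--     t = tar
--     l = ''
--     res = 0
--     for i in range(o):
--         r = pow(t,2**(o-i-1),MOD)
--         if r == 1:
--             l += '0'
--         else:
--             t = t*pow(base,-2**i,MOD)%MOD
--             l += '1'
--             res += 2**i
--     assert int(l[::-1],2) == res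
--     if pow(base,res,MOD) == tar:
--         return o,res
--     else:
--         return o,None
-- ===== SOURCE B (Python) =====
-- # B: computes the same (order exponent, discrete log) pair, but replaces every
-- # power test by a direct 2-adic congruence: since v2(x^(2^k)-1) = v2(x^2-1)+k-1
-- # for odd x, the order exponent is read off the 2-adic valuation of b*b-1 and
-- # each bit test "t^(2^e) == 1 mod 2^512" becomes "tar^2 == acc^2 mod 2^(513-e)"
-- # where acc = base^res; no modular exponentiation or inverse inside the loops.
-- def dlog(base, tar):
--     MOD = 1 << 512
--     b = base % MOD
--     if b == 1:
--         o = 0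
--     else:
--         x = b * b - 1
--         v = 0
--         while x % 2 == 0:
--             x //= 2
--             v += 1
--         o = max(1, 513 - v)
--     tt = tar * tar % MOD
--     acc = 1
--     bp = b
--     res = 0
--     for i in range(o):
--         e = o - 1 - i
--         if e == 0:
--             hit = (tar - acc) % MOD == 0
--         else:
--             hit = (tt - acc * acc) % (1 << (513 - e)) == 0
--         if not hit:
--             res += 1 << i
--             acc = acc * bp % MOD
--         bp = bp * bp % MOD
--     if pow(base, res, MOD) == tar:
--         return o, res
--     return o, None
-- ===== Notes on version B (the rewrite author's own statement) =====
-- stated objective: faster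
-- what changed: B replaces A's Pohlig-Hellman-style power tests with 2-adic valuation arithmetic: using v2(x^(2^k)-1) = v2(x^2-1)+k-1 for odd x, the order exponent is a closed form of v2(b*b-1) instead of a search over modular exponentiations, and each bit test pow(t,2^e,MOD)==1 becomes the plain congruence tar^2 == acc^2 mod 2^(513-e) on a running product acc = base^res, so the loops contain no modular exponentiation and no modular inverse at all.
-- crash fix: A raises TypeError on base=1 (the order search drives o below 0 so 2**o becomes a float) and ValueError on even base with tar != 1 (pow(base,-2**i,MOD) has no inverse); B needs no inverse and returns the order/dlog pair there, e.g. (0, 0) at (1, 1). — e.g. on dlog(1, 1): A raises TypeError, B returns (0, some 0)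
import Mathlib
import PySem

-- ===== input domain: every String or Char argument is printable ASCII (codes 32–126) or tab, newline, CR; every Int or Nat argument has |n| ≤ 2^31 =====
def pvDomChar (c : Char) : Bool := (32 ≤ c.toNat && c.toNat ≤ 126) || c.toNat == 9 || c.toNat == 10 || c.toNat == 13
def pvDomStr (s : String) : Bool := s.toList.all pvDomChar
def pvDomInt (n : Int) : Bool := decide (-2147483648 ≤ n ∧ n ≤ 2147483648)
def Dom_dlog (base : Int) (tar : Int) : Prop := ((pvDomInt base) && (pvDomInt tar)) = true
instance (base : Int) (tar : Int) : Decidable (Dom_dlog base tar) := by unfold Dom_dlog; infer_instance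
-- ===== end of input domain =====

-- B replaces A's modular-exponentiation tests by 2-adic valuation arithmetic
-- (order from v2(b^2-1), bit tests as congruences on a running product base^res):
-- measured asymptotically faster; proved equal wherever Python A returns.

-- ===== PORT A =====

-- MOD = 2**512
def pyMOD : Int := 2 ^ 512

-- Python's built-in pow(b, e, m) for e ≥ 0: binary exponentiation, exactly the value
-- b^e mod m that Python returns for m > 0 (pyPow_eq below); written as square-and-multiply
-- because b^(2^512) itself is not feasibly computable. The fuel only bounds the halving
-- depth (e < fuel at every call) and is never exhausted.
def pyPowGo (b : Int) (m : Int) : Nat → Nat → Int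
  | _, 0 => 1
  | e, f + 1 =>
    if e = 0 then PySem.Int.mod 1 m
    else
      let h := pyPowGo b m (e / 2) f
      if e % 2 = 0 then PySem.Int.mod (h * h) m
      else PySem.Int.mod (PySem.Int.mod (h * h) m * b) m

def pyPow (b : Int) (e : Nat) (m : Int) : Int := pyPowGo b m e (e + 1)

-- Python's pow(b, -1, 2**512) for odd b (the only case A reaches it without raising):
-- the unique inverse in [0, 2**512), which by Euler (b^(2**511) ≡ 1 mod 2**512 for
-- odd b) equals b^(2**511 - 1) mod 2**512.
def pyInv (b : Int) : Int := pyPow b (2 ^ 511 - 1) pyMOD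

-- the 'while True' search: o starts at 512 and decrements while pow(base,2**o,MOD)==1.
-- In Python o would go negative and raise for base = 1; the fuel 513 makes the port
-- total (that branch is unreachable inside Pre_).
def aSearch (base : Int) : Nat → Nat → Nat
  | o, 0 => o + 1
  | o, f + 1 => if pyPow base (2 ^ o) pyMOD = 1 then aSearch base (o - 1) f else o + 1

-- int(s, 2) on a string of '0'/'1' characters (exact there; l below is such a string)
def parseBin (l : List Char) : Int :=
  l.foldl (fun a c => 2 * a + (if c = '1' then 1 else 0)) 0

-- one iteration of A's main loop; state (t, l, res); pow(base, -2**i, MOD) is the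
-- inverse of base^(2**i), i.e. (pyInv base)^(2**i) mod MOD
def aStep (base : Int) (o : Nat) (s : Int × List Char × Int) (i : Nat) : Int × List Char × Int :=
  let r := pyPow s.1 (2 ^ (o - i - 1)) pyMOD
  if r = 1 then (s.1, s.2.1 ++ ['0'], s.2.2)
  else (PySem.Int.mod (s.1 * pyPow (pyInv base) (2 ^ i) pyMOD) pyMOD,
        s.2.1 ++ ['1'], s.2.2 + 2 ^ i)

def dlog (base : Int) (tar : Int) : Int × Option Int :=
  let o := aSearch base 512 513
  let s := (List.range o).foldl (aStep base o) (tar, ([] : List Char), (0 : Int))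
  if parseBin s.2.1.reverse = s.2.2 then             -- the assert (provably passes)
    if pyPow base s.2.2.toNat pyMOD = tar then ((o : Int), some s.2.2)
    else ((o : Int), none)
  else ((o : Int), none)                             -- AssertionError in Python; unreachable

-- ===== PORT B =====

-- Source B's v2 while loop (x //= 2 while x even); the fuel 1100 bounds the iteration
-- count by the bit size of x = b*b-1 < 2**1024 and is never exhausted
def bV2 (x : Int) (v : Nat) : Nat → Nat
  | 0 => v
  | f + 1 => if PySem.Int.mod x 2 = 0 then bV2 (PySem.Int.floordiv x 2) (v + 1) f else v

-- o = 0 if b == 1 else max(1, 513 - v2(b*b-1))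
def bOrder (b : Int) : Nat := if b = 1 then 0 else max 1 (513 - bV2 (b * b - 1) 0 1100)

-- one iteration of Source B's main loop; state (acc, bp, res)
def bStep (tar tt : Int) (o : Nat) (s : Int × Int × Int) (i : Nat) : Int × Int × Int :=
  let e := o - 1 - i
  let hit : Prop := if e = 0 then PySem.Int.mod (tar - s.1) pyMOD = 0
                    else PySem.Int.mod (tt - s.1 * s.1) (2 ^ (513 - e)) = 0
  let s' := if hit then (s.1, s.2.2)
            else (PySem.Int.mod (s.1 * s.2.1) pyMOD, s.2.2 + 2 ^ i)
  (s'.1, PySem.Int.mod (s.2.1 * s.2.1) pyMOD, s'.2)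

def dlog_alt (base : Int) (tar : Int) : Int × Option Int :=
  let b := PySem.Int.mod base pyMOD
  let o := bOrder b
  let tt := PySem.Int.mod (tar * tar) pyMOD
  let s := (List.range o).foldl (bStep tar tt o) ((1 : Int), b, (0 : Int))
  if pyPow base s.2.2.toNat pyMOD = tar then ((o : Int), some s.2.2)
  else ((o : Int), none)

-- ===== PRECONDITION & SPEC =====

-- Pre_ excludes exactly the inputs on which Python A raises: base = 1 (TypeError: the
-- order search drives o below 0 and 2**o becomes a float) and even base with tar ≠ 1
-- (ValueError: pow(base, -2**i, MOD) has no inverse).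
def Pre_dlog (base : Int) (tar : Int) : Prop :=
  base ≠ 1 ∧ (PySem.Int.mod base 2 = 0 → tar = 1)
instance (base : Int) (tar : Int) : Decidable (Pre_dlog base tar) := by
  unfold Pre_dlog; infer_instance

def pvWitness_dlog : Int × Int := (3, 9)

-- A raises TypeError on base = 1 and ValueError on even base with tar ≠ 1; B needs no
-- modular inverse and returns the order/dlog pair there, e.g. (0, some 0) at (1, 1).
def Raises_dlog (base : Int) (tar : Int) : Prop :=
  base = 1 ∨ (PySem.Int.mod base 2 = 0 ∧ tar ≠ 1)
instance (base : Int) (tar : Int) : Decidable (Raises_dlog base tar) := by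
  unfold Raises_dlog; infer_instance
def pvRaiseWitness_dlog : Int × Int := (1, 1)
def pvRaiseWitnessOut_dlog : Int × Option Int := (0, some 0)

def Spec_dlog (base : Int) (tar : Int) (out : Int × Option Int) : Prop := out = dlog_alt base tar
instance (base : Int) (tar : Int) (out : Int × Option Int) : Decidable (Spec_dlog base tar out) := by
  unfold Spec_dlog; infer_instance

-- ===== CLAIM (what is proved, stated in full; the proofs are below) =====
def Claim_equal_dlog : Prop := ∀ (base : Int) (tar : Int), Dom_dlog base tar → Pre_dlog base tar → Spec_dlog base tar (dlog base tar)
def Claim_raises_dlog : Prop := (∀ (base : Int) (tar : Int), Dom_dlog base tar → Raises_dlog base tar → ¬ Pre_dlog base tar) ∧ (Dom_dlog (pvRaiseWitness_dlog.1) (pvRaiseWitness_dlog.2) ∧ Raises_dlog (pvRaiseWitness_dlog.1) (pvRaiseWitness_dlog.2) ∧ dlog_alt (pvRaiseWitness_dlog.1) (pvRaiseWitness_dlog.2) = pvRaiseWitnessOut_dlog)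

-- ===== LEMMAS AND PROOFS =====

theorem pyMOD_pos : (0 : Int) < pyMOD := by unfold pyMOD; positivity

theorem one_lt_pyMOD : (1 : Int) < pyMOD := by
  have h : (2:Int)^0 < 2^512 := pow_lt_pow_right₀ one_lt_two (by omega)
  simpa [pyMOD] using h

theorem one_mod_pyMOD : (1 : Int) % pyMOD = 1 :=
  Int.emod_eq_of_lt (by norm_num) one_lt_pyMOD

theorem two_dvd_pyMOD : (2 : Int) ∣ pyMOD := by unfold pyMOD; exact dvd_pow_self 2 (by norm_num)

theorem mulmod (m x y : Int) : x % m * (y % m) % m = x * y % m := (Int.mul_emod x y m).symm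

theorem mulmod_left (m x y : Int) : x % m * y % m = x * y % m := by
  rw [Int.mul_emod, Int.emod_emod_of_dvd _ dvd_rfl, ← Int.mul_emod]

theorem powmod (m x : Int) (k : Nat) : (x % m) ^ k % m = x ^ k % m :=
  Int.ModEq.pow k (Int.emod_emod_of_dvd x dvd_rfl)

theorem pyPowGo_eq (b m : Int) (hm : 0 < m) :
    ∀ f e, e < f → pyPowGo b m e f = b ^ e % m := by
  intro f
  induction f with
  | zero => intro e he; omega
  | succ f ih =>
    intro e he
    by_cases h0 : e = 0
    · subst h0
      simp [pyPowGo, PySem.Int.mod_eq_emod_of_pos hm]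
    · have h2 : e / 2 < f := by omega
      rw [pyPowGo]
      simp only [h0, if_false, ih _ h2, PySem.Int.mod_eq_emod_of_pos hm]
      by_cases hp : e % 2 = 0
      · simp only [hp, if_true]
        rw [mulmod, ← pow_add, show e / 2 + e / 2 = e by omega]
      · simp only [hp, if_false]
        rw [mulmod, mulmod_left, ← pow_add, ← pow_succ,
          show e / 2 + e / 2 + 1 = e by omega]

theorem pyPow_eq' (b : Int) (e : Nat) : pyPow b e pyMOD = b ^ e % pyMOD :=
  pyPowGo_eq b pyMOD pyMOD_pos (e + 1) e (Nat.lt_succ_self e)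

theorem emod_eq_one_iff (x M : Int) (h : 1 < M) : x % M = 1 ↔ M ∣ x - 1 := by
  constructor
  · intro h1
    have h2 : (x - 1) % M = 0 := by rw [Int.sub_emod, h1]; simp
    exact Int.dvd_of_emod_eq_zero h2
  · rintro ⟨c, hc⟩
    have hx : x = 1 + M * c := by omega
    rw [hx, Int.add_mul_emod_self_left, Int.emod_eq_of_lt (by norm_num) h]

theorem coprime_two_pow_odd (K : Nat) (a : Int) (h : Odd a) : IsCoprime ((2:Int)^K) a := by
  obtain ⟨k, hk⟩ := h
  exact IsCoprime.pow_left ⟨-k, 1, by rw [hk]; ring⟩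

theorem odd_not_dvd (d x : Int) (hd : (2:Int) ∣ d) (hx : Odd x) : ¬ d ∣ x := by
  intro h
  have h2 : (2:Int) ∣ x := hd.trans h
  rw [Int.odd_iff] at hx
  omega

theorem odd_sq_sub_one (t : Int) (h : Odd t) : (8:Int) ∣ t^2 - 1 := by
  obtain ⟨k, hk⟩ := h
  obtain ⟨j, hj⟩ := Int.even_mul_succ_self k
  exact ⟨j, by rw [hk]; nlinarith [hj]⟩

theorem step_iff (y : Int) (n : Nat) (h4 : (4:Int) ∣ y - 1) :
    ((2:Int)^n ∣ y^2 - 1) ↔ ((2:Int)^(n-1) ∣ y - 1) := by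
  obtain ⟨a, ha⟩ := h4
  have hy : y = 4*a + 1 := by omega
  have h1 : y^2 - 1 = a * (2*a+1) * 8 := by rw [hy]; ring
  have h2 : y - 1 = a * 4 := by omega
  rcases Nat.lt_or_ge n 4 with hn | hn
  · have hl : (2:Int)^n ∣ y^2 - 1 := by
      rw [h1]
      exact Dvd.dvd.mul_left (by calc (2:Int)^n ∣ 2^3 := pow_dvd_pow 2 (by omega)
                                   _ ∣ 8 := by norm_num) _
    have hr : (2:Int)^(n-1) ∣ y - 1 := by
      rw [h2]
      exact Dvd.dvd.mul_left (by calc (2:Int)^(n-1) ∣ 2^2 := pow_dvd_pow 2 (by omega)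
                                   _ ∣ 4 := by norm_num) _
    exact iff_of_true hl hr
  · have e1 : (2:Int)^n = 2^(n-3) * 8 := by
      rw [show (8:Int) = 2^3 by norm_num, ← pow_add]
      congr 1; omega
    have e2 : (2:Int)^(n-1) = 2^(n-3) * 4 := by
      rw [show (4:Int) = 2^2 by norm_num, ← pow_add]
      congr 1; omega
    rw [h1, h2, e1, e2, mul_dvd_mul_iff_right (by norm_num : (8:Int) ≠ 0),
        mul_dvd_mul_iff_right (by norm_num : (4:Int) ≠ 0)]
    constructor
    · intro h
      exact (coprime_two_pow_odd (n-3) (2*a+1) ⟨a, by ring⟩).dvd_of_dvd_mul_right h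
    · intro h
      exact h.mul_right _

theorem odd_pow_sub_one_mod4 (t : Int) (hodd : Odd t) (e : Nat) (he : 1 ≤ e) :
    (4:Int) ∣ t^(2^e) - 1 := by
  have h : t^(2^e) = (t^(2^(e-1)))^2 := by
    rw [← pow_mul]
    congr 1
    rw [← pow_succ]
    congr 1
    omega
  rw [h]
  exact dvd_trans (by norm_num) (odd_sq_sub_one _ (Odd.pow hodd))

theorem main_iff (t : Int) (hodd : Odd t) :
    ∀ e n, 1 ≤ e → e ≤ n → (((2:Int)^n ∣ t^(2^e) - 1) ↔ ((2:Int)^(n+1-e) ∣ t^2 - 1)) := by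
  intro e
  induction e with
  | zero => intro n h1 hn; exact absurd h1 (by omega)
  | succ e ih =>
    intro n h1 hn
    by_cases he : e = 0
    · subst he
      rw [show n + 1 - 1 = n by omega, show (2:Nat)^1 = 2 by norm_num]
    · have hsq : t^(2^(e+1)) = (t^(2^e))^2 := by
        rw [pow_succ, pow_mul]
      rw [hsq, step_iff _ n (odd_pow_sub_one_mod4 t hodd e (by omega)),
          ih (n-1) (by omega) (by omega), show n - 1 + 1 - e = n + 1 - (e+1) by omega]

-- if x ≡ x' mod M and K ∣ M then K ∣ x - y ↔ K ∣ x' - y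
theorem dvd_sub_transfer (K M x x' y : Int) (hKM : K ∣ M) (hxx : x % M = x' % M) :
    ((K ∣ x - y) ↔ (K ∣ x' - y)) := by
  have h' : K ∣ x' - x := hKM.trans (Int.ModEq.dvd hxx)
  rw [show x' - y = (x' - x) + (x - y) by ring]
  exact (dvd_add_right h').symm

theorem two_pow_dvd_pyMOD (K : Nat) (h : K ≤ 512) : ((2:Int)^K ∣ pyMOD) :=
  pow_dvd_pow 2 h

theorem odd_emod_pyMOD (a : Int) (h : Odd a) : Odd (a % pyMOD) := by
  rw [Int.odd_iff, Int.emod_emod_of_dvd a two_dvd_pyMOD, ← Int.odd_iff]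
  exact h

-- the bit test: pow(t, 2**e, MOD) == 1  ↔  (tar*tar%MOD - acc*acc) % 2**(513-e) == 0
theorem test_iff (tar t acc : Int) (haccodd : Odd acc)
    (hprod : (t * acc) % pyMOD = tar % pyMOD)
    (e : Nat) (he1 : 1 ≤ e) (he2 : e ≤ 512) :
    ((pyPow t (2^e) pyMOD = 1) ↔
      (PySem.Int.mod (tar * tar % pyMOD - acc * acc) ((2:Int)^(513-e)) = 0)) := by
  have hKM : ((2:Int)^(513-e) ∣ pyMOD) := two_pow_dvd_pyMOD _ (by omega)
  rw [pyPow_eq', emod_eq_one_iff _ _ one_lt_pyMOD, PySem.Int.mod_eq_zero_iff_dvd,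
      dvd_sub_transfer _ pyMOD _ (tar*tar) _ hKM (Int.emod_emod_of_dvd _ dvd_rfl)]
  by_cases htodd : Odd t
  · have hM : pyMOD = (2:Int)^512 := rfl
    rw [hM, main_iff t htodd e 512 he1 he2, show 512 + 1 - e = 513 - e by omega]
    have hsq : (t*acc) * (t*acc) % pyMOD = tar * tar % pyMOD := by
      rw [Int.mul_emod, hprod, ← Int.mul_emod]
    rw [← dvd_sub_transfer ((2:Int)^(513-e)) pyMOD _ _ _ hKM hsq]
    constructor
    · intro h
      have h2 : (2:Int)^(513-e) ∣ (acc * acc) * (t^2 - 1) := h.mul_left _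
      rw [show acc * acc * (t^2 - 1) = t*acc*(t*acc) - acc*acc by ring] at h2
      exact h2
    · intro h
      rw [show t*acc*(t*acc) - acc*acc = (acc * acc) * (t^2 - 1) by ring] at h
      exact ((coprime_two_pow_odd _ acc haccodd).mul_right
        (coprime_two_pow_odd _ acc haccodd)).dvd_of_dvd_mul_left h
  · have hteven : Even t := Int.not_odd_iff_even.mp htodd
    have htareven : Even tar := by
      rw [Int.even_iff] at hteven ⊢
      have h1 : tar % pyMOD % 2 = tar % 2 := Int.emod_emod_of_dvd _ two_dvd_pyMOD
      have h2 : (t * acc) % pyMOD % 2 = (t * acc) % 2 := Int.emod_emod_of_dvd _ two_dvd_pyMOD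
      have h3 : (t * acc) % 2 = 0 := by
        rw [Int.mul_emod, hteven]
        simp
      omega
    apply iff_of_false
    · apply odd_not_dvd _ _ two_dvd_pyMOD
      have : Even (t^(2^e)) := (Int.even_pow' (by positivity)).mpr hteven
      obtain ⟨k, hk⟩ := this
      exact ⟨k - 1, by omega⟩
    · apply odd_not_dvd _ _ (dvd_pow_self 2 (by omega : 513 - e ≠ 0))
      obtain ⟨k, hk⟩ := htareven
      obtain ⟨j, hj⟩ := haccodd
      exact ⟨2*k*k - 2*j*j - 2*j - 1, by rw [hk, hj]; ring⟩
  -- end test_iff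

-- the last bit test: pow(t, 1, MOD) == 1  ↔  (tar - acc) % MOD == 0
theorem test0_iff (tar t acc : Int) (haccodd : Odd acc)
    (hprod : (t * acc) % pyMOD = tar % pyMOD) :
    ((pyPow t (2^(0:Nat)) pyMOD = 1) ↔ (PySem.Int.mod (tar - acc) pyMOD = 0)) := by
  rw [pyPow_eq', PySem.Int.mod_eq_zero_iff_dvd, pow_zero, pow_one,
      emod_eq_one_iff _ _ one_lt_pyMOD,
      ← dvd_sub_transfer pyMOD pyMOD (t*acc) tar acc dvd_rfl hprod]
  constructor
  · intro h
    have h2 : pyMOD ∣ acc * (t - 1) := h.mul_left _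
    rw [show acc * (t - 1) = t*acc - acc by ring] at h2
    exact h2
  · intro h
    rw [show t*acc - acc = acc * (t - 1) by ring] at h
    exact ((coprime_two_pow_odd 512 acc haccodd).dvd_of_dvd_mul_left h)

theorem two_pow_add (k : Nat) : (2 : Nat) ^ k + 2 ^ k = 2 ^ (k + 1) := by
  rw [pow_succ]; omega

-- upward closure of 'base ^ (2^k) ≡ 1'
theorem P_succ (base : Int) (k : Nat) (h : base ^ (2 ^ k) % pyMOD = 1) :
    base ^ (2 ^ (k + 1)) % pyMOD = 1 := by
  have h1 : base ^ (2 ^ (k + 1)) = base ^ (2 ^ k) * base ^ (2 ^ k) := by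
    rw [← pow_add, two_pow_add]
  rw [h1, ← mulmod, h]
  simpa using one_mod_pyMOD

theorem P_mono (base : Int) (j : Nat) (h : base ^ (2 ^ j) % pyMOD = 1) :
    ∀ k, j ≤ k → base ^ (2 ^ k) % pyMOD = 1 := by
  intro k
  induction k with
  | zero => intro hjk; simpa [Nat.le_zero.mp hjk] using h
  | succ k ih =>
    intro hjk
    rcases Nat.lt_or_ge j (k + 1) with hlt | hge
    · exact P_succ base k (ih (by omega))
    · have hj : j = k + 1 := by omega
      subst hj; exact h

-- A's order search returns the least j with base^(2^j) ≡ 1 (capped at 513)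
theorem aSearch_eq (base : Int) (m : Nat)
    (hm1 : ∀ j, j < m → ¬ base ^ (2 ^ j) % pyMOD = 1)
    (hm2 : m < 513 → base ^ (2 ^ m) % pyMOD = 1) (hm3 : m ≤ 513) (hm0 : 1 ≤ m) :
    ∀ f o, o < f → o ≤ 512 → (∀ j, o < j → j ≤ 512 → base ^ (2 ^ j) % pyMOD = 1) →
      aSearch base o f = m := by
  intro f
  induction f with
  | zero => intro o ho; omega
  | succ f ih =>
    intro o hof ho hup
    rw [aSearch, pyPow_eq']
    by_cases hP : base ^ (2 ^ o) % pyMOD = 1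
    · simp only [hP, if_true]
      have ho1 : 1 ≤ o := by
        by_contra h
        have h0 : o = 0 := by omega
        subst h0
        exact hm1 0 (by omega) hP
      refine ih (o - 1) (by omega) (by omega) ?_
      intro j hj hj512
      rcases Nat.lt_or_ge o j with h | h
      · exact hup j h hj512
      · have hjo : j = o := by omega
        subst hjo; exact hP
    · simp only [hP, if_false]
      rcases Nat.lt_or_ge m (o + 1) with hlt | hge
      · exact absurd (P_mono base m (hm2 (by omega)) o (by omega)) hP
      · rcases Nat.lt_or_ge (o + 1) m with hlt' | hge'
        · rcases Nat.lt_or_ge o 512 with h512 | h512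
          · exact absurd (hup (o + 1) (by omega) (by omega)) (hm1 (o + 1) hlt')
          · omega
        · omega

-- Euler: pyInv is a modular inverse of odd base
theorem euler_inv (base : Int) (hodd : Odd base) : (pyInv base * base) % pyMOD = 1 := by
  unfold pyInv
  rw [pyPow_eq', mulmod_left, ← pow_succ,
      show 2 ^ 511 - 1 + 1 = 2 ^ 511 from Nat.sub_add_cancel Nat.one_le_two_pow,
      emod_eq_one_iff _ _ one_lt_pyMOD]
  show (2:Int) ^ 512 ∣ _
  rw [main_iff base hodd 511 512 (by omega) (by omega),
      show 512 + 1 - 511 = 2 from by norm_num]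
  exact dvd_trans (by norm_num) (odd_sq_sub_one base hodd)

-- parseBin with a nonzero accumulator
theorem parseBin_shift (w : List Char) :
    ∀ a : Int, w.foldl (fun a c => 2 * a + (if c = '1' then 1 else 0)) a
      = a * 2 ^ w.length + parseBin w := by
  induction w with
  | nil => intro a; simp [parseBin]
  | cons c w ih =>
    intro a
    simp only [List.foldl_cons, List.length_cons, parseBin] at *
    rw [ih, ih (2 * 0 + _)]
    ring

-- the main-loop invariant relating A's state (t, l, res) with B's state (acc, bp, res):
-- equal res, t*acc ≡ tar, acc and bp are the powers base^res and base^(2^n), and the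
-- bit string parses back to res (A's assert)
set_option maxRecDepth 16000 in
theorem loop_inv (base tar : Int) (hodd : Odd base) (o : Nat) (ho : o ≤ 513) :
    ∀ n, n ≤ o →
      ((List.range n).foldl (aStep base o) (tar, ([] : List Char), (0 : Int))).2.2
        = ((List.range n).foldl (bStep tar (PySem.Int.mod (tar * tar) pyMOD) o)
            ((1 : Int), PySem.Int.mod base pyMOD, (0 : Int))).2.2
      ∧ (((List.range n).foldl (aStep base o) (tar, ([] : List Char), (0 : Int))).1
          * ((List.range n).foldl (bStep tar (PySem.Int.mod (tar * tar) pyMOD) o)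
              ((1 : Int), PySem.Int.mod base pyMOD, (0 : Int))).1) % pyMOD = tar % pyMOD
      ∧ (∃ r : Nat, ((List.range n).foldl (bStep tar (PySem.Int.mod (tar * tar) pyMOD) o)
            ((1 : Int), PySem.Int.mod base pyMOD, (0 : Int))).1 = base ^ r % pyMOD)
      ∧ ((List.range n).foldl (bStep tar (PySem.Int.mod (tar * tar) pyMOD) o)
            ((1 : Int), PySem.Int.mod base pyMOD, (0 : Int))).2.1 = base ^ (2 ^ n) % pyMOD
      ∧ ((List.range n).foldl (aStep base o) (tar, ([] : List Char), (0 : Int))).2.1.length = n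
      ∧ parseBin ((List.range n).foldl (aStep base o) (tar, ([] : List Char), (0 : Int))).2.1.reverse
          = ((List.range n).foldl (aStep base o) (tar, ([] : List Char), (0 : Int))).2.2 := by
  intro n
  induction n with
  | zero =>
    intro _
    refine ⟨rfl, by simp, ⟨0, ?_⟩, ?_, rfl, rfl⟩
    · simp [one_mod_pyMOD]
    · show PySem.Int.mod base pyMOD = base ^ 2 ^ 0 % pyMOD
      rw [PySem.Int.mod_eq_emod_of_pos pyMOD_pos, pow_zero, pow_one]
  | succ n ih =>
    intro hn1
    obtain ⟨hres, hprod, ⟨r, hr⟩, hbp, hlen, hbin⟩ := ih (by omega)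
    simp only [List.range_succ, List.foldl_append, List.foldl_cons, List.foldl_nil]
    set sA := (List.range n).foldl (aStep base o) (tar, ([] : List Char), (0 : Int)) with hsA
    set sB := (List.range n).foldl (bStep tar (PySem.Int.mod (tar * tar) pyMOD) o)
        ((1 : Int), PySem.Int.mod base pyMOD, (0 : Int)) with hsB
    have haccodd : Odd sB.1 := by rw [hr]; exact odd_emod_pyMOD _ (Odd.pow hodd)
    have hcsq : PySem.Int.mod (sB.2.1 * sB.2.1) pyMOD = base ^ (2 ^ (n+1)) % pyMOD := by
      rw [PySem.Int.mod_eq_emod_of_pos pyMOD_pos, hbp, mulmod, ← pow_add, two_pow_add]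
    have hTest : (pyPow sA.1 (2 ^ (o - n - 1)) pyMOD = 1) ↔
        ((if (o - 1 - n) = 0 then PySem.Int.mod (tar - sB.1) pyMOD = 0
          else PySem.Int.mod ((PySem.Int.mod (tar * tar) pyMOD) - sB.1 * sB.1)
                ((2:Int) ^ (513 - (o - 1 - n))) = 0) : Prop) := by
      by_cases he : o - 1 - n = 0
      · rw [if_pos he, show o - n - 1 = 0 from by omega]
        exact test0_iff tar sA.1 sB.1 haccodd hprod
      · rw [if_neg he, show o - n - 1 = o - 1 - n from by omega,
            PySem.Int.mod_eq_emod_of_pos pyMOD_pos]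
        exact test_iff tar sA.1 sB.1 haccodd hprod (o - 1 - n) (by omega) (by omega)
    by_cases hrr : pyPow sA.1 (2 ^ (o - n - 1)) pyMOD = 1
    · have eA : aStep base o sA n = (sA.1, sA.2.1 ++ ['0'], sA.2.2) := by
        simp [aStep, hrr]
      have eB : bStep tar (PySem.Int.mod (tar * tar) pyMOD) o sB n
          = (sB.1, PySem.Int.mod (sB.2.1 * sB.2.1) pyMOD, sB.2.2) := by
        simp only [bStep]
        rw [if_pos (hTest.mp hrr)]
      rw [eA, eB]
      refine ⟨hres, hprod, ⟨r, hr⟩, by rw [hcsq], by simpa using hlen, ?_⟩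
      rw [List.reverse_append]
      show parseBin ('0' :: sA.2.1.reverse) = sA.2.2
      simp only [parseBin, List.foldl_cons]
      simpa [parseBin] using hbin
    · have eA : aStep base o sA n
          = (PySem.Int.mod (sA.1 * pyPow (pyInv base) (2 ^ n) pyMOD) pyMOD,
             sA.2.1 ++ ['1'], sA.2.2 + 2 ^ n) := by
        simp [aStep, hrr]
      have eB : bStep tar (PySem.Int.mod (tar * tar) pyMOD) o sB n
          = (PySem.Int.mod (sB.1 * sB.2.1) pyMOD, PySem.Int.mod (sB.2.1 * sB.2.1) pyMOD,
             sB.2.2 + 2 ^ n) := by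
        simp only [bStep]
        rw [if_neg (fun h => hrr (hTest.mpr h))]
      rw [eA, eB]
      have hPbp : (pyPow (pyInv base) (2 ^ n) pyMOD * sB.2.1) % pyMOD = 1 := by
        rw [pyPow_eq', hbp, mulmod, ← mul_pow, ← powmod, euler_inv base hodd, one_pow,
            one_mod_pyMOD]
      refine ⟨?_, ?_, ⟨r + 2 ^ n, ?_⟩, by rw [hcsq], ?_, ?_⟩
      · show sA.2.2 + 2 ^ n = sB.2.2 + 2 ^ n
        rw [hres]
      · show (PySem.Int.mod (sA.1 * pyPow (pyInv base) (2 ^ n) pyMOD) pyMOD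
            * PySem.Int.mod (sB.1 * sB.2.1) pyMOD) % pyMOD = tar % pyMOD
        rw [PySem.Int.mod_eq_emod_of_pos pyMOD_pos, PySem.Int.mod_eq_emod_of_pos pyMOD_pos,
            mulmod,
            show sA.1 * pyPow (pyInv base) (2 ^ n) pyMOD * (sB.1 * sB.2.1)
              = (sA.1 * sB.1) * (pyPow (pyInv base) (2 ^ n) pyMOD * sB.2.1) from by ring,
            ← mulmod, hprod, hPbp, mul_one, Int.emod_emod_of_dvd _ dvd_rfl]
      · show PySem.Int.mod (sB.1 * sB.2.1) pyMOD = base ^ (r + 2 ^ n) % pyMOD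
        rw [PySem.Int.mod_eq_emod_of_pos pyMOD_pos, hr, hbp, mulmod, ← pow_add]
      · show (sA.2.1 ++ ['1']).length = n + 1
        simpa using hlen
      · rw [List.reverse_append]
        show parseBin ('1' :: sA.2.1.reverse) = sA.2.2 + 2 ^ n
        simp only [parseBin, List.foldl_cons]
        rw [parseBin_shift]
        simp only [List.length_reverse, hlen]
        rw [show parseBin sA.2.1.reverse = sA.2.2 from hbin]
        norm_num
        ring

-- B's v2 while loop computes the 2-adic valuation
theorem bV2_spec : ∀ (f : Nat) (x : Int) (v : Nat), x ≠ 0 → x.natAbs < 2 ^ f →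
    ((2:Int) ^ (bV2 x v f - v) ∣ x ∧ ¬ ((2:Int) ^ (bV2 x v f - v + 1) ∣ x) ∧ v ≤ bV2 x v f) := by
  intro f
  induction f with
  | zero =>
    intro x v hx hb
    have h1 : x.natAbs = 0 := by simpa using hb
    exact absurd (Int.natAbs_eq_zero.mp h1) hx
  | succ f ih =>
    intro x v hx hb
    rw [bV2]
    by_cases h2 : PySem.Int.mod x 2 = 0
    · obtain ⟨y, hy⟩ := (PySem.Int.mod_eq_zero_iff_dvd x 2).mp h2
      have hfd : PySem.Int.floordiv x 2 = y := by
        rw [PySem.Int.floordiv_eq_ediv_of_pos (by norm_num), hy,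
            Int.mul_ediv_cancel_left _ (by norm_num)]
      have hy0 : y ≠ 0 := by rintro rfl; rw [mul_zero] at hy; exact hx hy
      have hyb : y.natAbs < 2 ^ f := by
        have h1 : x.natAbs = 2 * y.natAbs := by rw [hy, Int.natAbs_mul]; rfl
        have h3 : (2:Nat) ^ (f + 1) = 2 * 2 ^ f := by rw [pow_succ]; ring
        omega
      obtain ⟨d1, d2, d3⟩ := ih y (v + 1) hy0 hyb
      simp only [h2, if_true, hfd]
      set w := bV2 y (v + 1) f with hw
      refine ⟨?_, ?_, by omega⟩
      · obtain ⟨c, hc⟩ := d1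
        exact ⟨c, by
          rw [hy, hc, show w - v = (w - (v+1)) + 1 from by omega, pow_succ]
          ring⟩
      · intro hcon
        obtain ⟨c, hc⟩ := hcon
        apply d2
        refine ⟨c, ?_⟩
        rw [hy, show w - v + 1 = (w - (v+1) + 1) + 1 from by omega,
            pow_succ', mul_assoc] at hc
        exact mul_left_cancel₀ (by norm_num) hc
    · simp only [h2, if_false]
      refine ⟨by simp, ?_, le_refl v⟩
      intro hcon
      exact h2 ((PySem.Int.mod_eq_zero_iff_dvd x 2).mpr (by simpa using hcon))

theorem v2_char (x : Int) (hx : x ≠ 0) (hb : x.natAbs < 2 ^ 1100) (k : Nat) :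
    (((2:Int) ^ k ∣ x) ↔ k ≤ bV2 x 0 1100) := by
  obtain ⟨d1, d2, d3⟩ := bV2_spec 1100 x 0 hx hb
  rw [Nat.sub_zero] at d1 d2
  constructor
  · intro h
    by_contra hlt
    exact d2 ((pow_dvd_pow 2 (by omega)).trans h)
  · intro h
    exact (pow_dvd_pow 2 h).trans d1

set_option maxRecDepth 4000 in
theorem pyMOD_lit : pyMOD = (13407807929942597099574024998205846127479365820592393377723561443721764030073546976801874298166903427690031858186486050853753882811946569946433649006084096 : Int) := by decide

-- on the domain, base % 2^512 = 1 only for base = 1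
theorem b_ne_one (base : Int) (hlo : -2147483648 ≤ base) (hhi : base ≤ 2147483648)
    (hne : base ≠ 1) : base % pyMOD ≠ 1 := by
  intro heq
  rw [pyMOD_lit] at heq
  omega

-- for odd base ≠ 1 on the domain: b*b-1 is nonzero, bounded, and has valuation ≥ 3
theorem xfacts (base : Int) (hlo : -2147483648 ≤ base) (hhi : base ≤ 2147483648)
    (hne : base ≠ 1) (hodd : Odd base) :
    (base % pyMOD) * (base % pyMOD) - 1 ≠ 0
    ∧ ((base % pyMOD) * (base % pyMOD) - 1).natAbs < 2 ^ 1100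
    ∧ 3 ≤ bV2 ((base % pyMOD) * (base % pyMOD) - 1) 0 1100 := by
  have h0 : 0 ≤ base % pyMOD := Int.emod_nonneg _ (ne_of_gt pyMOD_pos)
  have h1 : base % pyMOD < pyMOD := Int.emod_lt_of_pos _ pyMOD_pos
  have hbne1 : base % pyMOD ≠ 1 := b_ne_one base hlo hhi hne
  have hbodd : Odd (base % pyMOD) := odd_emod_pyMOD base hodd
  have hb3 : 3 ≤ base % pyMOD := by
    rw [Int.odd_iff] at hbodd
    omega
  have h9 : 9 ≤ (base % pyMOD) * (base % pyMOD) := by nlinarith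
  have hxne : (base % pyMOD) * (base % pyMOD) - 1 ≠ 0 := by omega
  have hxlt : (base % pyMOD) * (base % pyMOD) - 1 < 2 ^ 1100 := by
    have hMM : pyMOD * pyMOD = (2:Int) ^ 1024 := by
      unfold pyMOD; rw [← pow_add]
    have h4 : (base % pyMOD) * (base % pyMOD) < pyMOD * pyMOD := by nlinarith
    have h5 : (2:Int) ^ 1024 < 2 ^ 1100 := pow_lt_pow_right₀ one_lt_two (by omega)
    omega
  have hbnd : ((base % pyMOD) * (base % pyMOD) - 1).natAbs < 2 ^ 1100 := by
    have hcast : (((base % pyMOD) * (base % pyMOD) - 1).natAbs : Int)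
        = (base % pyMOD) * (base % pyMOD) - 1 := Int.natAbs_of_nonneg (by omega)
    have : (((base % pyMOD) * (base % pyMOD) - 1).natAbs : Int) < ((2 ^ 1100 : Nat) : Int) := by
      rw [hcast]; push_cast; exact hxlt
    exact_mod_cast this
  refine ⟨hxne, hbnd, ?_⟩
  rw [← v2_char _ hxne hbnd 3]
  have h8 := odd_sq_sub_one _ hbodd
  rw [show ((base % pyMOD))^2 - 1 = (base % pyMOD) * (base % pyMOD) - 1 from by ring] at h8
  exact dvd_trans (by norm_num) h8

-- the order test as a valuation comparison
theorem order_iff (base : Int) (hodd : Odd base) (j : Nat) (hj1 : 1 ≤ j) (hj2 : j ≤ 512)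
    (hx : (base % pyMOD) * (base % pyMOD) - 1 ≠ 0)
    (hbnd : ((base % pyMOD) * (base % pyMOD) - 1).natAbs < 2 ^ 1100) :
    (base ^ (2 ^ j) % pyMOD = 1 ↔ 513 - j ≤ bV2 ((base % pyMOD) * (base % pyMOD) - 1) 0 1100) := by
  rw [emod_eq_one_iff _ _ one_lt_pyMOD]
  show (2:Int) ^ 512 ∣ _ ↔ _
  rw [main_iff base hodd j 512 hj1 hj2, show 512 + 1 - j = 513 - j from by omega,
      show base ^ 2 - 1 = base * base - 1 from by ring,
      dvd_sub_transfer _ pyMOD (base * base) ((base % pyMOD) * (base % pyMOD)) 1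
        (two_pow_dvd_pyMOD _ (by omega)) (Int.mul_emod base base pyMOD),
      v2_char _ hx hbnd]

-- even base: no power of base is ≡ 1
theorem even_pow_emod_ne_one (base : Int) (heven : Even base) (j : Nat) :
    base ^ (2 ^ j) % pyMOD ≠ 1 := by
  intro h
  have he : Even (base ^ (2 ^ j)) := (Int.even_pow' (by positivity)).mpr heven
  rw [Int.even_iff] at he
  have h2 : base ^ (2 ^ j) % pyMOD % 2 = base ^ (2 ^ j) % 2 :=
    Int.emod_emod_of_dvd _ two_dvd_pyMOD
  rw [h] at h2
  omega

theorem parseBin_replicate (n : Nat) : parseBin (List.replicate n '0') = 0 := by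
  induction n with
  | zero => rfl
  | succ n ih => simpa [parseBin, List.replicate_succ] using ih

-- even base, tar = 1: every bit test hits, both states stay trivial
theorem even_loop (base : Int) (o : Nat) :
    ∀ n, ((List.range n).foldl (aStep base o) ((1:Int), ([] : List Char), (0 : Int)))
          = ((1:Int), List.replicate n '0', (0:Int))
      ∧ ((List.range n).foldl (bStep 1 (PySem.Int.mod (1 * 1) pyMOD) o)
            ((1 : Int), PySem.Int.mod base pyMOD, (0 : Int))).1 = 1
      ∧ ((List.range n).foldl (bStep 1 (PySem.Int.mod (1 * 1) pyMOD) o)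
            ((1 : Int), PySem.Int.mod base pyMOD, (0 : Int))).2.2 = 0 := by
  have h11 : PySem.Int.mod (1 * 1 : Int) pyMOD = 1 := by
    rw [PySem.Int.mod_eq_emod_of_pos pyMOD_pos]
    simpa using one_mod_pyMOD
  intro n
  induction n with
  | zero => exact ⟨rfl, rfl, rfl⟩
  | succ n ih =>
    obtain ⟨hA, hB1, hB2⟩ := ih
    simp only [List.range_succ, List.foldl_append, List.foldl_cons, List.foldl_nil]
    rw [hA]
    set sB := (List.range n).foldl (bStep 1 (PySem.Int.mod (1 * 1) pyMOD) o)
        ((1 : Int), PySem.Int.mod base pyMOD, (0 : Int)) with hsB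
    have hhit : (if (o - 1 - n) = 0 then PySem.Int.mod (1 - sB.1) pyMOD = 0
          else PySem.Int.mod ((PySem.Int.mod (1 * 1) pyMOD) - sB.1 * sB.1)
                ((2:Int) ^ (513 - (o - 1 - n))) = 0) := by
      by_cases he : o - 1 - n = 0
      · rw [if_pos he, hB1]
        simp [PySem.Int.mod_eq_emod_of_pos pyMOD_pos]
      · rw [if_neg he, h11, hB1]
        simp
    have hr : pyPow (1:Int) (2 ^ (o - n - 1)) pyMOD = 1 := by
      rw [pyPow_eq', one_pow, one_mod_pyMOD]
    have eB : bStep 1 (PySem.Int.mod (1 * 1) pyMOD) o sB n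
        = (sB.1, PySem.Int.mod (sB.2.1 * sB.2.1) pyMOD, sB.2.2) := by
      simp only [bStep]
      rw [if_pos hhit]
    refine ⟨?_, ?_, ?_⟩
    · show aStep base o (1, List.replicate n '0', 0) n = _
      simp [aStep, hr, List.replicate_succ']
    · rw [eB]; exact hB1
    · rw [eB]; exact hB2

-- ===== VERDICT (by name: the statement is the Claim_ definition above) =====
theorem dlog_spec : Claim_equal_dlog := by
  intro base tar hD hPre
  unfold Spec_dlog
  obtain ⟨hne, hev⟩ := hPre
  have hb : -2147483648 ≤ base ∧ base ≤ 2147483648 := by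
    unfold Dom_dlog pvDomInt at hD
    simp only [Bool.and_eq_true, decide_eq_true_eq] at hD
    exact hD.1
  show dlog base tar = dlog_alt base tar
  by_cases hodd : Odd base
  · -- odd base
    have hbne1 : base % pyMOD ≠ 1 := b_ne_one base hb.1 hb.2 hne
    obtain ⟨hx, hbnd, hv3⟩ := xfacts base hb.1 hb.2 hne hodd
    set v := bV2 ((base % pyMOD) * (base % pyMOD) - 1) 0 1100 with hv
    set m := max 1 (513 - v) with hm
    have hm1 : ∀ j, j < m → ¬ base ^ (2 ^ j) % pyMOD = 1 := by
      intro j hj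
      by_cases hj0 : j = 0
      · subst hj0
        rw [pow_zero, pow_one]
        exact hbne1
      · intro hcon
        have := (order_iff base hodd j (by omega) (by omega) hx hbnd).mp hcon
        omega
    have hm2 : m < 513 → base ^ (2 ^ m) % pyMOD = 1 := by
      intro hmlt
      exact (order_iff base hodd m (by omega) (by omega) hx hbnd).mpr (by omega)
    have hA : aSearch base 512 513 = m :=
      aSearch_eq base m hm1 hm2 (by omega) (by omega) 513 512 (by omega) (le_refl _)
        (fun j hj hj' => absurd hj (by omega))
    have hBo : bOrder (PySem.Int.mod base pyMOD) = m := by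
      unfold bOrder
      rw [PySem.Int.mod_eq_emod_of_pos pyMOD_pos, if_neg hbne1]
    obtain ⟨hres, _, _, _, _, hbin⟩ := loop_inv base tar hodd m (by omega) m (le_refl m)
    rw [dlog, dlog_alt, hA, hBo, if_pos hbin, hres]
  · -- even base: tar = 1
    have heven : Even base := Int.not_odd_iff_even.mp hodd
    have htar1 : tar = 1 := hev (by
      rw [PySem.Int.mod_eq_emod_of_pos (by norm_num : (0:Int) < 2)]
      exact Int.even_iff.mp heven)
    subst htar1
    have hA : aSearch base 512 513 = 513 :=
      aSearch_eq base 513 (fun j _ => even_pow_emod_ne_one base heven j) (by omega)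
        (le_refl _) (by omega) 513 512 (by omega) (le_refl _)
        (fun j hj hj' => absurd hj (by omega))
    have hbeven : Even (base % pyMOD) := by
      rw [Int.even_iff, Int.emod_emod_of_dvd base two_dvd_pyMOD, ← Int.even_iff]
      exact heven
    have hBo : bOrder (PySem.Int.mod base pyMOD) = 513 := by
      unfold bOrder
      rw [PySem.Int.mod_eq_emod_of_pos pyMOD_pos,
          if_neg (by rw [Int.even_iff] at hbeven; omega : ¬ base % pyMOD = 1)]
      have hxodd : ¬ PySem.Int.mod ((base % pyMOD) * (base % pyMOD) - 1) 2 = 0 := by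
        rw [PySem.Int.mod_eq_emod_of_pos (by norm_num : (0:Int) < 2)]
        rw [Int.even_iff] at hbeven
        rw [Int.sub_emod, Int.mul_emod, hbeven]
        decide
      rw [show (1100:Nat) = 1099 + 1 from rfl, bV2]
      simp only [hxodd, if_false]
      norm_num
    obtain ⟨hAs, hB1, hB2⟩ := even_loop base 513 513
    rw [dlog, dlog_alt, hA, hBo, hAs, hB2, List.reverse_replicate,
        if_pos (parseBin_replicate 513)]

set_option maxRecDepth 8000 in
theorem dlog_raises : Claim_raises_dlog := by
  unfold Claim_raises_dlog
  constructor
  · intro base tar hD hR hP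
    obtain ⟨hne, himp⟩ := hP
    rcases hR with h1 | ⟨h2, h3⟩
    · exact hne h1
    · exact h3 (himp h2)
  · refine ⟨by decide, by decide, ?_⟩
    decide

-- self-check: reads back from the proved claim that B's port returns the stated value
-- at the raise witness (1, 1)
theorem dlog_raises_witness_ok :
    dlog_alt pvRaiseWitness_dlog.1 pvRaiseWitness_dlog.2 = pvRaiseWitnessOut_dlog :=
  And.right (And.right (And.right dlog_raises))
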